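-- pv_equiv track=rewrite | github.com/rajeshwarideoraj/CodeGuru_Drona | participant_files/hard_lab_ayden.py | orderUp
-- ===== SOURCE A (Python) =====
-- def separateOrders(str):
--     if (str.find(",") == -1):
--         return [str]
--     return [str[: str.find(",")]] + separateOrders(str[str.find(",") + 2:])
--
-- def onePlateToAnother(pancakes):
--     if (len(pancakes) == 0):
--         return []
--     else:
--         return [pancakes[len(pancakes) - 1]] + onePlateToAnother(pancakes[:len(pancakes) - 1])
--
-- def orderUp(totalNum, orders):
--     result = ""
--     if len(orders) == 0:
--         return result
--     first_order = orders[0]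
--     separated_order = separateOrders(first_order)
--     flipped_order = onePlateToAnother(separated_order)
--     order_number = totalNum - len(orders) + 1
--     result += f"Order #{order_number}, your order of {flipped_order} pancakes is up!\n"
--     return result + orderUp(totalNum, orders[1:])
-- ===== SOURCE B (Python) =====
-- def orderUp(totalNum, orders):
--     lines = []
--     base = totalNum - len(orders) + 1
--     for i, order in enumerate(orders):
--         tokens = []
--         s = order
--         while True:
--             j = s.find(',')
--             if j == -1:
--                 tokens.append(s)
--                 break
--             tokens.append(s[:j])
--             s = s[j + 2:]
--         tokens.reverse()
--         lines.append(f"Order #{base + i}, your order of {tokens} pancakes is up!\n")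
--     return "".join(lines)
-- ===== Notes on version B (the rewrite author's own statement) =====
-- stated objective: simpler
-- what changed: Replaced A's three recursions (recursive comma-splitter, recursive last-element list reversal, recursive per-order formatter that re-slices orders[1:] and rebuilds the result string each call) by one iterative enumerate loop with a precomputed base order number, an explicit while/find tokenizer, list.reverse, and a line accumulator joined once.
import Mathlib
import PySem

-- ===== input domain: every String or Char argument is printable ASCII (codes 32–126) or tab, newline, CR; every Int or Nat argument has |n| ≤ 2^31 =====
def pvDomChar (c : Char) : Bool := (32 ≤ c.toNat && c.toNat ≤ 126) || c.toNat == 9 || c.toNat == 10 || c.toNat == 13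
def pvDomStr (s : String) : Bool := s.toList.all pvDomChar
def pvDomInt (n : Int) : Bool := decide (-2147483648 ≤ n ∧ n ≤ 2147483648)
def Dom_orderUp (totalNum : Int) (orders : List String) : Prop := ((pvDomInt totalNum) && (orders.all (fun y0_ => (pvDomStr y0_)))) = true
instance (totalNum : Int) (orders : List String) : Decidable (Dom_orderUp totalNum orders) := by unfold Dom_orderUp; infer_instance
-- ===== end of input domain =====

-- B replaces A's three recursions by one iterative enumerate loop with an explicit tokenizer; objective: simpler.


-- Shared f-string helper: Python's repr of a str (exact on the Dom alphabet: printable ASCII plus tab/newline/CR).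
-- repr uses single quotes, double quotes if the string contains ' but not "; escapes \, tab, newline, CR and the quote char.
def pyReprChars (s : List Char) : List Char :=
  let q : Char := if s.contains '\'' && !s.contains '"' then '"' else '\''
  q :: (s.flatMap (fun c =>
    if c = '\\' then ['\\', '\\']
    else if c = '\t' then ['\\', 't']
    else if c = '\n' then ['\\', 'n']
    else if c = '\r' then ['\\', 'r']
    else if c = q then ['\\', q]
    else [c])) ++ [q]

-- Python's str(list-of-str): '[' + ', '.join(repr(x)) + ']'
def pyReprStrList (l : List (List Char)) : List Char :=
  '[' :: (PySem.Chars.join [',', ' '] (l.map pyReprChars)) ++ [']']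

-- the f-string "Order #{n}, your order of {flipped} pancakes is up!\n" (used by both Pythons)
def fmtLine (n : Int) (flipped : List (List Char)) : List Char :=
  "Order #".toList ++ (PySem.Int.toStr n).toList ++ ", your order of ".toList
    ++ pyReprStrList flipped ++ " pancakes is up!\n".toList

-- ===== PORT A =====
-- separateOrders: str.find(",") via Chars.find; str[:i] = take i, str[i+2:] = drop (i+2) (i ≥ 0 here)
def sepOrders (s : List Char) : List (List Char) :=
  if PySem.Chars.find s [','] = -1 then [s]
  else (s.take (PySem.Chars.find s [',']).toNat)
       :: sepOrders (s.drop ((PySem.Chars.find s [',']).toNat + 2))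
termination_by s.length
decreasing_by
  have h1 : [','] <:+: s := by
    rw [← PySem.Chars.find_ne_neg_one_iff]; assumption
  have h2 : 1 ≤ s.length := h1.length_le
  simp only [List.length_drop]; omega

-- onePlateToAnother: pancakes[len-1] :: recurse on pancakes[:len-1]
def onePlate (p : List (List Char)) : List (List Char) :=
  if p.length = 0 then []
  else p.getD (p.length - 1) [] :: onePlate (p.take (p.length - 1))
termination_by p.length
decreasing_by simp only [List.length_take]; omega

def orderUpGo (t : Int) (orders : List String) : List Char :=
  match orders with
  | [] => []
  | o :: rest =>
      fmtLine (t - ((o :: rest).length : Int) + 1) (onePlate (sepOrders o.toList))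
        ++ orderUpGo t rest

def orderUp (totalNum : Int) (orders : List String) : String :=
  String.ofList (orderUpGo totalNum orders)

-- ===== PORT B =====
-- the while/find tokenizer of Source B: appends s[:j] to the accumulator, continues on s[j+2:]
def tokenizeB (s : List Char) (acc : List (List Char)) : List (List Char) :=
  if PySem.Chars.find s [','] = -1 then acc ++ [s]
  else tokenizeB (s.drop ((PySem.Chars.find s [',']).toNat + 2))
       (acc ++ [s.take (PySem.Chars.find s [',']).toNat])
termination_by s.length
decreasing_by
  have h1 : [','] <:+: s := by
    rw [← PySem.Chars.find_ne_neg_one_iff]; assumption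
  have h2 : 1 ≤ s.length := h1.length_le
  simp only [List.length_drop]; omega

def orderUp_alt (totalNum : Int) (orders : List String) : String :=
  let base := totalNum - (orders.length : Int) + 1
  let lines := (PySem.List.enumerate orders 0).foldl
    (fun acc p => acc ++ [fmtLine (base + p.1) ((tokenizeB p.2.toList []).reverse)]) []
  String.ofList lines.flatten   -- ''.join(lines)

-- ===== PRECONDITION & SPEC =====
def Spec_orderUp (totalNum : Int) (orders : List String) (out : String) : Prop := out = orderUp_alt totalNum orders
instance (totalNum : Int) (orders : List String) (out : String) : Decidable (Spec_orderUp totalNum orders out) := by unfold Spec_orderUp; infer_instance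

-- ===== CLAIM (what is proved, stated in full; the proofs are below) =====
def Claim_equal_orderUp : Prop := ∀ (totalNum : Int) (orders : List String), Dom_orderUp totalNum orders → Spec_orderUp totalNum orders (orderUp totalNum orders)

-- ===== LEMMAS AND PROOFS =====

theorem tokenizeB_eq (s : List Char) : ∀ acc, tokenizeB s acc = acc ++ sepOrders s := by
  induction s using sepOrders.induct with
  | case1 s h => intro acc; rw [tokenizeB, sepOrders]; simp [h]
  | case2 s h ih =>
      intro acc; rw [tokenizeB, sepOrders]
      simp only [h, ih]
      simp

theorem onePlate_eq (p : List (List Char)) : onePlate p = p.reverse := by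
  induction p using onePlate.induct with
  | case1 p h => rw [onePlate]; simp [List.length_eq_zero_iff.mp h]
  | case2 p h ih =>
      have hne : p ≠ [] := by intro hp; simp [hp] at h
      rw [onePlate, if_neg h, ih]
      have hlast : p.getD (p.length - 1) [] = p.getLast hne := by
        rw [List.getLast_eq_getElem]
        rw [List.getD_eq_getElem?_getD, List.getElem?_eq_getElem (by omega)]
        simp
      have htake : p.take (p.length - 1) = p.dropLast := by
        rw [List.dropLast_eq_take]
      rw [hlast, htake]
      conv_rhs => rw [← List.dropLast_append_getLast hne]
      simp

theorem orderUpGo_eq (t b : Int) :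
    ∀ (orders : List String) (k : Int), b + k = t - (orders.length : Int) + 1 →
      orderUpGo t orders
        = ((PySem.List.enumerate orders k).map
            (fun p => fmtLine (b + p.1) ((sepOrders p.2.toList).reverse))).flatten := by
  intro orders
  induction orders with
  | nil => intro k _; simp [orderUpGo, PySem.List.enumerate_nil]
  | cons o rest ih =>
      intro k hk
      rw [orderUpGo, PySem.List.enumerate_cons]
      simp only [List.map_cons, List.flatten_cons]
      rw [← ih (k + 1) (by simp at hk ⊢; omega), onePlate_eq]
      congr 2
      simp at hk ⊢; omega

theorem orderUp_spec_aux (totalNum : Int) (orders : List String) :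
    orderUp totalNum orders = orderUp_alt totalNum orders := by
  unfold orderUp orderUp_alt
  simp only
  rw [PySem.List.foldl_congr_mem (PySem.List.enumerate orders)
      (fun acc p => acc ++ [fmtLine (totalNum - (orders.length : Int) + 1 + p.1)
                  ((tokenizeB p.2.toList []).reverse)])
      (fun acc p => acc ++ [fmtLine (totalNum - (orders.length : Int) + 1 + p.1)
                  ((sepOrders p.2.toList).reverse)])
      []
      (by intro acc p _; simp [tokenizeB_eq])]
  rw [PySem.List.foldl_append_singleton_eq_map, List.nil_append]
  rw [orderUpGo_eq totalNum (totalNum - (orders.length : Int) + 1) orders 0 (by omega)]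

-- ===== VERDICT (by name: the statement is the Claim_ definition above) =====
theorem orderUp_spec : Claim_equal_orderUp := by
  intro totalNum orders _
  unfold Spec_orderUp
  exact orderUp_spec_aux totalNum orders
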